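-- pv_equiv track=rewrite | github.com/Leedong-uk/algorithms-in-python | 2025/9월/9월26일/PG_전력망둘로나누기.py | solution
-- ===== SOURCE A (Python) =====
-- from collections import defaultdict
--
-- def solution(n,wires) :
--     answer = 0
--     linked_list = defaultdict(list)
--     tmp = [0] * (n+1)
--
--     for x , y in wires :
--         linked_list[x].append(y)
--         linked_list[y].append(x)
--
--
--     def dfs(curr,parent) :
--         cnt = 1
--         for next in linked_list[curr] :
--             if next != parent :
--                 cnt += dfs(next,curr)
--         tmp[curr] = cnt
--         return cnt
--
--     dfs(1,None)
--     answer = float('inf')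
--
--     for i in range(1,n+1) :
--         answer = min(abs(n-tmp[i]*2),answer)
--
--
--     return answer
-- ===== SOURCE B (Python) =====
-- def solution(n, wires):
--     adj = {}
--     for x, y in wires:
--         adj.setdefault(x, []).append(y)
--         adj.setdefault(y, []).append(x)
--     tmp = [0] * (n + 1)
--     # iterative DFS with an explicit frame stack: (node, parent, remaining neighbours, count so far)
--     stack = [(1, None, adj.get(1, []), 1)]
--     while stack:
--         node, par, rest, cnt = stack.pop()
--         if rest:
--             nxt, rest = rest[0], rest[1:]
--             stack.append((node, par, rest, cnt))
--             if nxt != par: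
--                 stack.append((nxt, node, adj.get(nxt, []), 1))
--         else:
--             tmp[node] = cnt
--             if stack:
--                 pn, pp, pr, pc = stack.pop()
--                 stack.append((pn, pp, pr, pc + cnt))
--     return min(abs(n - 2 * tmp[i]) for i in range(1, n + 1))
-- ===== Notes on version B (the rewrite author's own statement) =====
-- stated objective: alternative
-- what changed: Replaces A's recursive DFS (a nested closure mutating tmp) by an iterative explicit-stack DFS whose frames carry (node, parent, remaining neighbours, running count) and accumulate subtree sizes on frame return, and folds the final answer with min over a generator; no recursion is used.
-- outside the precondition, e.g. on solution(2, [[1, 2], [1, 2]]): A returns 0, B returns 0; on solution(1, [[1, 1]]): A returns 5, B returns 5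
import Mathlib
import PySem

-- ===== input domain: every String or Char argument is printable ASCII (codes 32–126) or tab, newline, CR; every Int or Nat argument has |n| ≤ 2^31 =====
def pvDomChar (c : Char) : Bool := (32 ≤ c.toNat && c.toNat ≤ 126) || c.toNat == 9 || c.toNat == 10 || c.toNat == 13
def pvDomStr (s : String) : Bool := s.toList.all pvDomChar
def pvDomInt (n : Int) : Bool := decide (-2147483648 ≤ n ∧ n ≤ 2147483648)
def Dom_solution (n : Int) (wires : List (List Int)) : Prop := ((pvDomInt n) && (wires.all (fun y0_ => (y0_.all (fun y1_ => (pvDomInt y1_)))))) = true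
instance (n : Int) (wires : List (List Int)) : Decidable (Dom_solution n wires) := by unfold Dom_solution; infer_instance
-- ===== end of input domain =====

-- B replaces A's recursive DFS by an iterative explicit-stack DFS (frames carry the remaining
-- neighbour list and a running count); same asymptotic cost, no recursion ("alternative").

-- ===== PORT A =====
-- Python list indexing on the tmp array, hand-ported (exact): negative indices wrap; an
-- out-of-range index (Python IndexError) is excluded by Pre_solution (no-op / 0 there)
def pyListSet (a : Array Int) (i : Int) (v : Int) : Array Int :=
  let j : Int := if i < 0 then i + a.size else i
  if j < 0 then a else a.setIfInBounds j.toNat v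

def pyListGet (a : Array Int) (i : Int) : Int :=
  let j : Int := if i < 0 then i + a.size else i
  if j < 0 then 0 else a.getD j.toNat 0

-- both Pythons build the same adjacency map (defaultdict(list) / setdefault): shared helper
def buildAdj (wires : List (List Int)) : PySem.Dict Int (List Int) :=
  wires.foldl (fun d w =>
    match w with
    | [x, y] => (d.modify x [] (· ++ [y])).modify y [] (· ++ [x])
    | _ => d)  -- 'for x, y in wires' raises unless the wire has exactly 2 entries: Pre_ excludes
    PySem.Dict.empty

-- A's dfs(curr, parent): fuel is a totality guard only (the Python recursion has none);
-- under Pre_solution the fuel 2*len(wires)+4 is proved sufficient below.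
mutual
def dfsA (adj : PySem.Dict Int (List Int)) (fuel : Nat) (curr : Int) (parent : Option Int)
    (tmp : Array Int) : Option (Int × Array Int) :=
  match fuel with
  | 0 => none
  | f + 1 =>
    match dfsAGo adj f curr (adj.getD curr []) parent 1 tmp with
    | none => none
    | some (cnt, t) => some (cnt, pyListSet t curr cnt)  -- tmp[curr] = cnt
termination_by (fuel, 0, 0)

def dfsAGo (adj : PySem.Dict Int (List Int)) (f : Nat) (curr : Int) (nbrs : List Int)
    (parent : Option Int) (cnt : Int) (tmp : Array Int) : Option (Int × Array Int) :=
  match nbrs with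
  | [] => some (cnt, tmp)
  | nxt :: rest =>
    if some nxt ≠ parent then
      match dfsA adj f nxt (some curr) tmp with
      | none => none
      | some (c, t) => dfsAGo adj f curr rest parent (cnt + c) t
    else dfsAGo adj f curr rest parent cnt tmp
termination_by (f, 1, nbrs.length)
end

def solution (n : Int) (wires : List (List Int)) : Int :=
  let adj := buildAdj wires
  let tmp : Array Int := Array.replicate (n + 1).toNat 0   -- [0] * (n+1)
  match dfsA adj (2 * wires.length + 4) 1 none tmp with
  | none => 0   -- fuel exhausted: unreachable under Pre_solution
  | some (_, t) =>
    -- answer = inf; for i in range(1, n+1): answer = min(abs(n - tmp[i]*2), answer)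
    ((PySem.List.pyRange 1 (n + 1) 1).foldl
      (fun (acc : Option Int) i =>
        some (match acc with
              | none => |n - (pyListGet t i) * 2|
              | some a => min (|n - (pyListGet t i) * 2|) a)) none).getD 0

-- ===== PORT B =====
-- Source B's while-loop over the explicit frame stack; one fuel per iteration (totality guard only)
def runB (adj : PySem.Dict Int (List Int)) (fuel : Nat)
    (stack : List (Int × Option Int × List Int × Int)) (tmp : Array Int) : Option (Array Int) :=
  match fuel, stack with
  | _, [] => some tmp
  | 0, _ => none
  | f + 1, (node, par, rest, cnt) :: stk =>
    match rest with
    | nxt :: rest' =>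
      if par = some nxt then runB adj f ((node, par, rest', cnt) :: stk) tmp
      else runB adj f ((nxt, some node, adj.getD nxt [], 1) :: (node, par, rest', cnt) :: stk) tmp
    | [] =>
      let t := pyListSet tmp node cnt   -- tmp[node] = cnt
      match stk with
      | [] => runB adj f [] t
      | (pn, pp, pr, pc) :: stk' => runB adj f ((pn, pp, pr, pc + cnt) :: stk') t

def solution_alt (n : Int) (wires : List (List Int)) : Int :=
  let adj := buildAdj wires
  let tmp : Array Int := Array.replicate (n + 1).toNat 0   -- [0] * (n+1)
  match runB adj ((2 * wires.length + 4) ^ (2 * wires.length + 5))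
      [(1, none, adj.getD 1 [], 1)] tmp with
  | none => 0   -- fuel exhausted: unreachable under Pre_solution
  | some t =>
    -- min(abs(n - 2*tmp[i]) for i in range(1, n+1))
    (PySem.List.min? ((PySem.List.pyRange 1 (n + 1) 1).map
        (fun i => |n - 2 * pyListGet t i|)) (fun x => x)).getD 0

-- ===== PRECONDITION & SPEC =====
-- Pre_'s own view of the input graph (independent of the ports)
def wireEdges (wires : List (List Int)) : List (Int × Int) :=
  wires.filterMap (fun w => match w with | [x, y] => some (x, y) | _ => none)

-- one BFS round: vertices adjacent to s (tested against the OLD s, so rounds = distance levels)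
def growStep (E : List (Int × Int)) (s : List Int) : List Int :=
  E.foldl (fun t e =>
    let t := if e.1 ∈ s ∧ e.2 ∉ t then t ++ [e.2] else t
    if e.2 ∈ s ∧ e.1 ∉ t then t ++ [e.1] else t) s

def reachN (E : List (Int × Int)) (k : Nat) : List Int := (growStep E)^[k] [1]

def reachAll (E : List (Int × Int)) : List Int := reachN E (2 * E.length + 2)

-- BFS level (graph distance from vertex 1); 0 junk off the component
def lvl (E : List (Int × Int)) (v : Int) : Nat :=
  ((List.range (2 * E.length + 3)).find? (fun k => decide (v ∈ reachN E k))).getD 0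

-- number of edge occurrences joining v to the previous level
def downCount (E : List (Int × Int)) (v : Int) : Nat :=
  E.countP (fun e => decide ((e.1 = v ∧ lvl E e.2 + 1 = lvl E v) ∨ (e.2 = v ∧ lvl E e.1 + 1 = lvl E v)))

-- Pre_ = the natural domain: n ≥ 1, every wire a pair, and the component of node 1 is a tree on
-- valid indices (edges join consecutive BFS levels, one parent edge each). Outside it A either
-- raises (n ≤ 0, a non-pair wire, an out-of-range index, a cycle = RecursionError) or returns
-- accidental double-counts on repeated/self edges — values B happens to share but the claim
-- does not cover.
def Pre_solution (n : Int) (wires : List (List Int)) : Prop :=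
  1 ≤ n ∧ (∀ w ∈ wires, w.length = 2) ∧
  (∀ v ∈ reachAll (wireEdges wires), -(n + 1) ≤ v ∧ v ≤ n) ∧
  (∀ e ∈ wireEdges wires, (e.1 ∈ reachAll (wireEdges wires) ∨ e.2 ∈ reachAll (wireEdges wires)) →
      (lvl (wireEdges wires) e.2 = lvl (wireEdges wires) e.1 + 1 ∨
       lvl (wireEdges wires) e.1 = lvl (wireEdges wires) e.2 + 1)) ∧
  (∀ v ∈ reachAll (wireEdges wires), v ≠ 1 → downCount (wireEdges wires) v = 1)

instance (n : Int) (wires : List (List Int)) : Decidable (Pre_solution n wires) := by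
  unfold Pre_solution; infer_instance

def pvWitness_solution : Int × List (List Int) := (3, [[1, 2], [1, 3]])

def Spec_solution (n : Int) (wires : List (List Int)) (out : Int) : Prop := out = solution_alt n wires
instance (n : Int) (wires : List (List Int)) (out : Int) : Decidable (Spec_solution n wires out) := by
  unfold Spec_solution; infer_instance

-- ===== CLAIM (what is proved, stated in full; the proofs are below) =====
def Claim_equal_solution : Prop := ∀ (n : Int) (wires : List (List Int)), Dom_solution n wires → Pre_solution n wires → Spec_solution n wires (solution n wires)

-- ===== LEMMAS AND PROOFS =====

lemma foldMinAux (g : Int → Int) : ∀ (l : List Int) (a : Int),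
    l.foldl (fun acc i => some (match acc with | none => g i | some x => min (g i) x)) (some a)
      = some ((l.map g).foldl min a) := by
  intro l
  induction l with
  | nil => intro a; rfl
  | cons i rest ih =>
    intro a
    simp only [List.foldl, List.map]
    rw [ih (min (g i) a), min_comm]

lemma final_loops_eq (n : Int) (t : Array Int) :
    ((PySem.List.pyRange 1 (n + 1) 1).foldl
      (fun (acc : Option Int) i =>
        some (match acc with
              | none => |n - (pyListGet t i) * 2|
              | some a => min (|n - (pyListGet t i) * 2|) a)) none).getD 0
    = (PySem.List.min? ((PySem.List.pyRange 1 (n + 1) 1).map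
        (fun i => |n - 2 * pyListGet t i|)) (fun x => x)).getD 0 := by
  have hg : (fun i => |n - 2 * pyListGet t i|) = (fun i => |n - (pyListGet t i) * 2|) := by
    funext i; rw [Int.mul_comm]
  rw [hg]
  cases hr : PySem.List.pyRange 1 (n + 1) 1 with
  | nil => rfl
  | cons x rest =>
    rw [List.map_cons, PySem.List.min?_id_cons]
    simp only [List.foldl]
    rw [foldMinAux]
def bumpTop : List (Int × Option Int × List Int × Int) → Int → List (Int × Option Int × List Int × Int)
  | [], _ => []
  | (pn, pp, pr, pc) :: s, c => (pn, pp, pr, pc + c) :: s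

lemma runB_nil (adj : PySem.Dict Int (List Int)) (F : Nat) (tmp : Array Int) :
    runB adj F [] tmp = some tmp := by cases F <;> rfl

lemma runB_skip (adj : PySem.Dict Int (List Int)) (m : Nat) (node : Int) (par : Option Int)
    (nxt : Int) (rest' : List Int) (cnt : Int) (stk : List (Int × Option Int × List Int × Int))
    (tmp : Array Int) (h : par = some nxt) :
    runB adj (m + 1) ((node, par, nxt :: rest', cnt) :: stk) tmp
      = runB adj m ((node, par, rest', cnt) :: stk) tmp := by
  simp [runB, h]

lemma runB_child (adj : PySem.Dict Int (List Int)) (m : Nat) (node : Int) (par : Option Int)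
    (nxt : Int) (rest' : List Int) (cnt : Int) (stk : List (Int × Option Int × List Int × Int))
    (tmp : Array Int) (h : ¬ par = some nxt) :
    runB adj (m + 1) ((node, par, nxt :: rest', cnt) :: stk) tmp
      = runB adj m ((nxt, some node, adj.getD nxt [], 1) :: (node, par, rest', cnt) :: stk) tmp := by
  simp [runB, h]

lemma runB_emit (adj : PySem.Dict Int (List Int)) (m : Nat) (node : Int) (par : Option Int)
    (cnt : Int) (stk : List (Int × Option Int × List Int × Int)) (tmp : Array Int) :
    runB adj (m + 1) ((node, par, [], cnt) :: stk) tmp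
      = runB adj m (bumpTop stk cnt) (pyListSet tmp node cnt) := by
  cases stk with
  | nil => simp [runB, bumpTop]
  | cons fr s => rcases fr with ⟨pn, pp, pr, pc⟩; simp [runB, bumpTop]

lemma simGo (adj : PySem.Dict Int (List Int)) (N : Nat)
    (hN : ∀ v, (adj.getD v []).length ≤ N) :
    ∀ (f : Nat) (curr : Int) (parent : Option Int) (nbrs : List Int) (cnt : Int)
      (tmp : Array Int) (c : Int) (t : Array Int),
      dfsAGo adj f curr nbrs parent cnt tmp = some (c, t) →
      ∃ k, k ≤ nbrs.length * (N + 2) ^ f + 1 ∧ ∀ (F : Nat) (stk : List (Int × Option Int × List Int × Int)),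
        runB adj (k + F) ((curr, parent, nbrs, cnt) :: stk) tmp
          = runB adj F (bumpTop stk c) (pyListSet t curr c) := by
  intro f
  induction f using Nat.strong_induction_on with
  | _ f IH =>
  intro curr parent nbrs
  induction nbrs generalizing curr parent with
  | nil =>
    intro cnt tmp c t h
    simp only [dfsAGo, Option.some.injEq, Prod.mk.injEq] at h
    obtain ⟨rfl, rfl⟩ := h
    exact ⟨1, by omega, fun F stk => by rw [Nat.add_comm]; exact runB_emit adj F curr parent cnt stk tmp⟩
  | cons nxt rest ihr =>
    intro cnt tmp c t h
    simp only [dfsAGo] at h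
    by_cases hpar : some nxt = parent
    · rw [if_neg (by simp [hpar])] at h
      obtain ⟨k₂, hk₂, hs₂⟩ := ihr curr parent cnt tmp c t h
      refine ⟨k₂ + 1, ?_, fun F stk => ?_⟩
      · have hp : 1 ≤ (N + 2) ^ f := Nat.one_le_pow _ _ (by omega)
        simp only [List.length_cons]; nlinarith
      · have he : k₂ + 1 + F = (k₂ + F) + 1 := by omega
        rw [he, runB_skip adj _ _ _ _ _ _ _ _ hpar.symm, hs₂]
    · rw [if_pos (by simp [hpar])] at h
      cases hd : dfsA adj f nxt (some curr) tmp with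
      | none => rw [hd] at h; exact absurd h (by simp)
      | some p =>
        rcases p with ⟨cc, t₁⟩
        rw [hd] at h
        cases f with
        | zero => exact absurd hd (by simp [dfsA])
        | succ g =>
          -- unfold the child's dfsA
          rw [dfsA] at hd
          cases hgo : dfsAGo adj g nxt (adj.getD nxt []) (some curr) 1 tmp with
          | none => rw [hgo] at hd; exact absurd hd (by simp)
          | some q =>
            rcases q with ⟨cnt₀, t₀⟩
            rw [hgo] at hd
            simp only [Option.some.injEq, Prod.mk.injEq] at hd
            obtain ⟨rfl, rfl⟩ := hd
            obtain ⟨k₁, hk₁, hs₁⟩ := IH g (Nat.lt_succ_self g) nxt (some curr)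
              (adj.getD nxt []) 1 tmp cnt₀ t₀ hgo
            obtain ⟨k₂, hk₂, hs₂⟩ := ihr curr parent (cnt + cnt₀) (pyListSet t₀ nxt cnt₀) c t h
            refine ⟨1 + k₁ + k₂, ?_, fun F stk => ?_⟩
            · have hp : 1 ≤ (N + 2) ^ g := Nat.one_le_pow _ _ (by omega)
              have hlen : (adj.getD nxt []).length ≤ N := hN nxt
              have hpow : (N + 2) ^ (g + 1) = (N + 2) ^ g * (N + 2) := pow_succ _ _
              simp only [List.length_cons]
              nlinarith
            · have he : 1 + k₁ + k₂ + F = (k₁ + (k₂ + F)) + 1 := by omega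
              rw [he, runB_child adj _ _ _ _ _ _ _ _ (fun hc => hpar hc.symm),
                hs₁ (k₂ + F) ((curr, parent, rest, cnt) :: stk)]
              show runB adj (k₂ + F) ((curr, parent, rest, cnt + cnt₀) :: stk) _ = _
              exact hs₂ F stk
lemma simA (adj : PySem.Dict Int (List Int)) (N : Nat)
    (hN : ∀ v, (adj.getD v []).length ≤ N) (f : Nat) (curr : Int) (parent : Option Int)
    (tmp : Array Int) (c : Int) (t : Array Int)
    (h : dfsA adj f curr parent tmp = some (c, t)) :
    ∃ k, k ≤ (N + 2) ^ f ∧ ∀ (F : Nat) (stk : List (Int × Option Int × List Int × Int)),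
      runB adj (k + F) ((curr, parent, adj.getD curr [], 1) :: stk) tmp
        = runB adj F (bumpTop stk c) t := by
  cases f with
  | zero => exact absurd h (by simp [dfsA])
  | succ g =>
    rw [dfsA] at h
    cases hgo : dfsAGo adj g curr (adj.getD curr []) parent 1 tmp with
    | none => rw [hgo] at h; exact absurd h (by simp)
    | some q =>
      rcases q with ⟨cnt₀, t₀⟩
      rw [hgo] at h
      simp only [Option.some.injEq, Prod.mk.injEq] at h
      obtain ⟨rfl, rfl⟩ := h
      obtain ⟨k, hk, hs⟩ := simGo adj N hN g curr parent (adj.getD curr []) 1 tmp cnt₀ t₀ hgo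
      refine ⟨k, ?_, hs⟩
      have hp : 1 ≤ (N + 2) ^ g := Nat.one_le_pow _ _ (by omega)
      have hlen : (adj.getD curr []).length ≤ N := hN curr
      have hpow : (N + 2) ^ (g + 1) = (N + 2) ^ g * (N + 2) := pow_succ _ _
      nlinarith

lemma runB_of_dfsA (adj : PySem.Dict Int (List Int)) (N : Nat)
    (hN : ∀ v, (adj.getD v []).length ≤ N) (f : Nat) (tmp : Array Int) (c : Int) (t : Array Int)
    (h : dfsA adj f 1 none tmp = some (c, t)) (FB : Nat) (hFB : (N + 2) ^ f ≤ FB) :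
    runB adj FB [(1, none, adj.getD 1 [], 1)] tmp = some t := by
  obtain ⟨k, hk, hs⟩ := simA adj N hN f 1 none tmp c t h
  have he : FB = k + (FB - k) := by omega
  rw [he, hs (FB - k) []]
  exact runB_nil adj _ t
lemma buildAdj_len_aux : ∀ (ws : List (List Int)) (d : PySem.Dict Int (List Int)) (v : Int),
    ((ws.foldl (fun d w =>
      match w with
      | [x, y] => (d.modify x [] (· ++ [y])).modify y [] (· ++ [x])
      | _ => d) d).getD v []).length ≤ (d.getD v []).length + 2 * ws.length := by
  intro ws
  induction ws with
  | nil => intro d v; simp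
  | cons w rest ih =>
    intro d v
    simp only [List.foldl, List.length_cons]
    refine le_trans (ih _ v) ?_
    have hstep : ∀ (d' : PySem.Dict Int (List Int)),
        (match w with
          | [x, y] => ((d'.modify x [] (· ++ [y])).modify y [] (· ++ [x]))
          | _ => d') = d' ∨
        ∃ x y, w = [x, y] ∧
          (match w with
            | [x, y] => ((d'.modify x [] (· ++ [y])).modify y [] (· ++ [x]))
            | _ => d') = (d'.modify x [] (· ++ [y])).modify y [] (· ++ [x]) := by
      intro d'
      match w with
      | [] => exact Or.inl rfl
      | [x] => exact Or.inl rfl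
      | [x, y] => exact Or.inr ⟨x, y, rfl, rfl⟩
      | x :: y :: z :: r => exact Or.inl rfl
    rcases hstep d with h | ⟨x, y, hw, h⟩
    · rw [h]; omega
    · rw [h]
      simp only [PySem.Dict.getD_modify]
      split_ifs <;> simp_all <;> omega
lemma buildAdj_len (wires : List (List Int)) (v : Int) :
    ((buildAdj wires).getD v []).length ≤ 2 * wires.length := by
  have := buildAdj_len_aux wires PySem.Dict.empty v
  simpa [buildAdj, PySem.Dict.getD_empty] using this

lemma mem_wireEdges_tail {e : Int × Int} (w : List Int) {ws : List (List Int)}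
    (h : e ∈ wireEdges ws) : e ∈ wireEdges (w :: ws) := by
  unfold wireEdges at *
  rw [List.filterMap_cons]
  cases hfw : (match w with | [x, y] => some ((x : Int), (y : Int)) | _ => none) <;> simp [h]

lemma head_mem_wireEdges (x y : Int) (ws : List (List Int)) :
    (x, y) ∈ wireEdges ([x, y] :: ws) := by
  simp [wireEdges]

lemma buildAdj_mem_aux : ∀ (ws : List (List Int)) (d : PySem.Dict Int (List Int)) (v x : Int),
    x ∈ ((ws.foldl (fun d w =>
      match w with
      | [x, y] => (d.modify x [] (· ++ [y])).modify y [] (· ++ [x])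
      | _ => d) d).getD v []) →
    x ∈ d.getD v [] ∨ (v, x) ∈ wireEdges ws ∨ (x, v) ∈ wireEdges ws := by
  intro ws
  induction ws with
  | nil => intro d v x h; exact Or.inl h
  | cons w rest ih =>
    intro d v x h
    simp only [List.foldl] at h
    have tail2 : ∀ e : Int × Int, e ∈ wireEdges rest → e ∈ wireEdges (w :: rest) :=
      fun e he => mem_wireEdges_tail w he
    rcases w with _ | ⟨a, _ | ⟨b, _ | ⟨c, r⟩⟩⟩
    · rcases ih _ v x h with h1 | h2 | h3
      · exact Or.inl h1
      · exact Or.inr (Or.inl (tail2 _ h2))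
      · exact Or.inr (Or.inr (tail2 _ h3))
    · rcases ih _ v x h with h1 | h2 | h3
      · exact Or.inl h1
      · exact Or.inr (Or.inl (tail2 _ h2))
      · exact Or.inr (Or.inr (tail2 _ h3))
    · -- head wire [a, b]
      rcases ih _ v x h with h1 | h2 | h3
      · simp only [PySem.Dict.getD_modify] at h1
        split_ifs at h1 with hb hba hva
        · subst hb; subst hba
          rcases List.mem_append.1 h1 with h2 | h2
          · rcases List.mem_append.1 h2 with h3 | h3
            · exact Or.inl h3
            · simp only [List.mem_singleton] at h3; subst h3
              exact Or.inr (Or.inl (head_mem_wireEdges _ _ _))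
          · simp only [List.mem_singleton] at h2; subst h2
            exact Or.inr (Or.inl (head_mem_wireEdges _ _ _))
        · subst hb
          rcases List.mem_append.1 h1 with h2 | h2
          · exact Or.inl h2
          · simp only [List.mem_singleton] at h2; subst h2
            exact Or.inr (Or.inr (head_mem_wireEdges _ _ _))
        · subst hva
          rcases List.mem_append.1 h1 with h2 | h2
          · exact Or.inl h2
          · simp only [List.mem_singleton] at h2; subst h2
            exact Or.inr (Or.inl (head_mem_wireEdges _ _ _))
        · exact Or.inl h1
      · exact Or.inr (Or.inl (tail2 _ h2))
      · exact Or.inr (Or.inr (tail2 _ h3))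
    · rcases ih _ v x h with h1 | h2 | h3
      · exact Or.inl h1
      · exact Or.inr (Or.inl (tail2 _ h2))
      · exact Or.inr (Or.inr (tail2 _ h3))

lemma buildAdj_mem (wires : List (List Int)) (v x : Int)
    (h : x ∈ (buildAdj wires).getD v []) :
    (v, x) ∈ wireEdges wires ∨ (x, v) ∈ wireEdges wires := by
  rcases buildAdj_mem_aux wires PySem.Dict.empty v x (by simpa [buildAdj] using h) with h1 | h2 | h3
  · simp [PySem.Dict.getD_empty] at h1
  · exact Or.inl h2
  · exact Or.inr h3
def gstep (s : List Int) : List Int → (Int × Int) → List Int := fun t e =>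
  let t' := if e.1 ∈ s ∧ e.2 ∉ t then t ++ [e.2] else t
  if e.2 ∈ s ∧ e.1 ∉ t' then t' ++ [e.1] else t'

lemma growStep_eq (E : List (Int × Int)) (s : List Int) :
    growStep E s = E.foldl (gstep s) s := rfl

lemma gstep_prefix (s t : List Int) (e : Int × Int) : ∃ l, gstep s t e = t ++ l := by
  unfold gstep
  by_cases h1 : e.1 ∈ s ∧ e.2 ∉ t
  · simp only [if_pos h1]
    by_cases h2 : e.2 ∈ s ∧ e.1 ∉ t ++ [e.2]
    · simp only [if_pos h2]; exact ⟨[e.2, e.1], by simp⟩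
    · simp only [if_neg h2]; exact ⟨[e.2], rfl⟩
  · simp only [if_neg h1]
    by_cases h2 : e.2 ∈ s ∧ e.1 ∉ t
    · simp only [if_pos h2]; exact ⟨[e.1], rfl⟩
    · simp only [if_neg h2]; exact ⟨[], by simp⟩

lemma mem_gstep (s t : List Int) (e : Int × Int) {x : Int} (h : x ∈ t) : x ∈ gstep s t e := by
  obtain ⟨l, hl⟩ := gstep_prefix s t e
  rw [hl]; exact List.mem_append_left _ h

lemma gstep_nbr (s t : List Int) (e : Int × Int) :
    (e.1 ∈ s → e.2 ∈ gstep s t e) ∧ (e.2 ∈ s → e.1 ∈ gstep s t e) := by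
  constructor
  · intro h1
    by_cases h2 : e.2 ∈ t
    · exact mem_gstep s t e h2
    · unfold gstep
      simp only [if_pos (⟨h1, h2⟩ : e.1 ∈ s ∧ e.2 ∉ t)]
      split_ifs with h3
      · simp
      · simp
  · intro h2
    unfold gstep
    by_cases h1 : e.1 ∈ s ∧ e.2 ∉ t
    · simp only [if_pos h1]
      by_cases h3 : e.1 ∈ t ++ [e.2]
      · simp only [if_neg (by simp_all : ¬ (e.2 ∈ s ∧ e.1 ∉ t ++ [e.2]))]
        exact h3
      · simp only [if_pos (⟨h2, h3⟩ : e.2 ∈ s ∧ e.1 ∉ t ++ [e.2])]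
        simp
    · simp only [if_neg h1]
      by_cases h3 : e.1 ∈ t
      · simp only [if_neg (by simp_all : ¬ (e.2 ∈ s ∧ e.1 ∉ t))]
        exact h3
      · simp only [if_pos (⟨h2, h3⟩ : e.2 ∈ s ∧ e.1 ∉ t)]
        simp

lemma gstep_fold_prefix : ∀ (E : List (Int × Int)) (s t : List Int),
    ∃ l, E.foldl (gstep s) t = t ++ l := by
  intro E
  induction E with
  | nil => intro s t; exact ⟨[], by simp⟩
  | cons e rest ih =>
    intro s t
    simp only [List.foldl]
    obtain ⟨l₀, h₀⟩ := gstep_prefix s t e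
    obtain ⟨l₁, h₁⟩ := ih s (gstep s t e)
    exact ⟨l₀ ++ l₁, by rw [h₁, h₀, List.append_assoc]⟩

lemma gstep_fold_mono {x : Int} : ∀ (E : List (Int × Int)) (s t : List Int),
    x ∈ t → x ∈ E.foldl (gstep s) t := by
  intro E s t hx
  obtain ⟨l, hl⟩ := gstep_fold_prefix E s t
  rw [hl]; exact List.mem_append_left _ hx

lemma gstep_fold_nbr : ∀ (E : List (Int × Int)) (s t : List Int) (e : Int × Int),
    e ∈ E → ((e.1 ∈ s → e.2 ∈ E.foldl (gstep s) t) ∧ (e.2 ∈ s → e.1 ∈ E.foldl (gstep s) t)) := by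
  intro E
  induction E with
  | nil => intro s t e he; simp at he
  | cons e₀ rest ih =>
    intro s t e he
    simp only [List.foldl]
    rcases List.mem_cons.1 he with rfl | he'
    · exact ⟨fun h1 => gstep_fold_mono rest s _ ((gstep_nbr s t e).1 h1),
        fun h2 => gstep_fold_mono rest s _ ((gstep_nbr s t e).2 h2)⟩
    · exact ih s (gstep s t e₀) e he'

lemma growStep_mem (E : List (Int × Int)) (s : List Int) {x : Int} (h : x ∈ s) :
    x ∈ growStep E s := by
  rw [growStep_eq]; exact gstep_fold_mono E s s h

lemma growStep_closed (E : List (Int × Int)) (s : List Int) (hfix : growStep E s = s)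
    (e : Int × Int) (he : e ∈ E) :
    (e.1 ∈ s → e.2 ∈ s) ∧ (e.2 ∈ s → e.1 ∈ s) := by
  have := gstep_fold_nbr E s s e he
  rw [← growStep_eq, hfix] at this
  exact this
lemma nodup_append_singleton {t : List Int} {x : Int} (h : t.Nodup) (hx : x ∉ t) :
    (t ++ [x]).Nodup := by
  rw [List.nodup_append]
  refine ⟨h, List.nodup_singleton x, ?_⟩
  intro a ha b hb
  rw [List.mem_singleton] at hb
  subst hb
  exact fun heq => hx (heq ▸ ha)

lemma gstep_nodup (s t : List Int) (e : Int × Int) (h : t.Nodup) : (gstep s t e).Nodup := by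
  unfold gstep
  by_cases h1 : e.1 ∈ s ∧ e.2 ∉ t
  · simp only [if_pos h1]
    have hn : (t ++ [e.2]).Nodup := nodup_append_singleton h h1.2
    by_cases h2 : e.2 ∈ s ∧ e.1 ∉ t ++ [e.2]
    · simp only [if_pos h2]; exact nodup_append_singleton hn h2.2
    · simp only [if_neg h2]; exact hn
  · simp only [if_neg h1]
    by_cases h2 : e.2 ∈ s ∧ e.1 ∉ t
    · simp only [if_pos h2]; exact nodup_append_singleton h h2.2
    · simp only [if_neg h2]; exact h

lemma gstep_fold_nodup : ∀ (E : List (Int × Int)) (s t : List Int), t.Nodup →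
    (E.foldl (gstep s) t).Nodup := by
  intro E
  induction E with
  | nil => intro s t h; exact h
  | cons e rest ih => intro s t h; exact ih s _ (gstep_nodup s t e h)

lemma gstep_subset (s t : List Int) (e : Int × Int) (U : List Int)
    (ht : ∀ x ∈ t, x ∈ U) (h1 : e.1 ∈ U) (h2 : e.2 ∈ U) : ∀ x ∈ gstep s t e, x ∈ U := by
  intro x hx
  have hcases : x ∈ t ∨ x = e.1 ∨ x = e.2 := by
    unfold gstep at hx
    by_cases hA : e.1 ∈ s ∧ e.2 ∉ t
    · rw [if_pos hA] at hx
      by_cases hB : e.2 ∈ s ∧ e.1 ∉ t ++ [e.2]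
      · rw [if_pos hB] at hx; simp only [List.mem_append, List.mem_singleton] at hx; tauto
      · rw [if_neg hB] at hx; simp only [List.mem_append, List.mem_singleton] at hx; tauto
    · rw [if_neg hA] at hx
      by_cases hB : e.2 ∈ s ∧ e.1 ∉ t
      · rw [if_pos hB] at hx; simp only [List.mem_append, List.mem_singleton] at hx; tauto
      · rw [if_neg hB] at hx; tauto
  rcases hcases with hx' | rfl | rfl
  · exact ht x hx'
  · exact h1
  · exact h2
lemma gstep_fold_subset (E : List (Int × Int)) (U : List Int)
    (hE : ∀ e ∈ E, e.1 ∈ U ∧ e.2 ∈ U) :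
    ∀ (E' : List (Int × Int)), (∀ e ∈ E', e ∈ E) → ∀ (s t : List Int), (∀ x ∈ t, x ∈ U) →
      ∀ x ∈ E'.foldl (gstep s) t, x ∈ U := by
  intro E'
  induction E' with
  | nil => intro _ s t ht x hx; exact ht x hx
  | cons e rest ih =>
    intro hsub s t ht x hx
    simp only [List.foldl] at hx
    refine ih (fun e' he' => hsub e' (List.mem_cons_of_mem e he')) s _ ?_ x hx
    have he : e ∈ E := hsub e List.mem_cons_self
    exact gstep_subset s t e U ht (hE e he).1 (hE e he).2

def edgeUniverse (E : List (Int × Int)) : List Int := 1 :: E.flatMap (fun e => [e.1, e.2])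

lemma flatMap_pair_len : ∀ (E : List (Int × Int)),
    (E.flatMap (fun e => [e.1, e.2])).length = 2 * E.length := by
  intro E
  induction E with
  | nil => rfl
  | cons e rest ih =>
    rw [List.flatMap_cons, List.length_append, ih]
    simp only [List.length_cons, List.length_nil, List.length_cons]
    omega

lemma edgeUniverse_length (E : List (Int × Int)) :
    (edgeUniverse E).length = 2 * E.length + 1 := by
  simp only [edgeUniverse, List.length_cons, flatMap_pair_len]

lemma reachN_succ (E : List (Int × Int)) (k : Nat) :
    reachN E (k + 1) = growStep E (reachN E k) := by
  unfold reachN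
  rw [Function.iterate_succ_apply']

lemma reachN_nodup (E : List (Int × Int)) (k : Nat) : (reachN E k).Nodup := by
  induction k with
  | zero => simp [reachN]
  | succ m ih => rw [reachN_succ, growStep_eq]; exact gstep_fold_nodup E _ _ ih

lemma reachN_subset_universe (E : List (Int × Int)) (k : Nat) :
    ∀ x ∈ reachN E k, x ∈ edgeUniverse E := by
  induction k with
  | zero => intro x hx; simp [reachN] at hx; simp [edgeUniverse, hx]
  | succ m ih =>
    rw [reachN_succ, growStep_eq]
    refine gstep_fold_subset E (edgeUniverse E) ?_ E (fun e he => he) _ _ ih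
    intro e he
    constructor <;> (simp only [edgeUniverse, List.mem_cons, List.mem_flatMap]; right)
    · exact ⟨e, he, by simp⟩
    · exact ⟨e, he, by simp⟩

lemma reachN_length_le (E : List (Int × Int)) (k : Nat) :
    (reachN E k).length ≤ 2 * E.length + 1 := by
  have h1 : (reachN E k).toFinset.card = (reachN E k).length :=
    List.toFinset_card_of_nodup (reachN_nodup E k)
  have h2 : (reachN E k).toFinset ⊆ (edgeUniverse E).toFinset := by
    intro x hx
    rw [List.mem_toFinset] at *
    exact reachN_subset_universe E k x hx
  calc (reachN E k).length = (reachN E k).toFinset.card := h1.symm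
    _ ≤ (edgeUniverse E).toFinset.card := Finset.card_le_card h2
    _ ≤ (edgeUniverse E).length := List.toFinset_card_le _
    _ = 2 * E.length + 1 := edgeUniverse_length E

lemma reachN_mono_le (E : List (Int × Int)) {j k : Nat} (h : j ≤ k) :
    ∀ x ∈ reachN E j, x ∈ reachN E k := by
  induction k with
  | zero => intro x hx; rw [Nat.le_zero.1 h] at hx; exact hx
  | succ m ih =>
    intro x hx
    rcases Nat.lt_or_ge j (m + 1) with hj | hj
    · rw [reachN_succ]
      exact growStep_mem E _ (ih (Nat.lt_succ_iff.1 hj) x hx)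
    · have : j = m + 1 := le_antisymm h hj
      rwa [this] at hx

lemma reach_fix_exists (E : List (Int × Int)) :
    ∃ k₀, k₀ ≤ 2 * E.length + 1 ∧ growStep E (reachN E k₀) = reachN E k₀ := by
  by_contra hno
  push Not at hno
  have grow : ∀ k, k ≤ 2 * E.length + 2 → k + 1 ≤ (reachN E k).length := by
    intro k
    induction k with
    | zero => intro _; simp [reachN]
    | succ m ih =>
      intro hm
      have h1 : m + 1 ≤ (reachN E m).length := ih (by omega)
      have hne : growStep E (reachN E m) ≠ reachN E m := hno m (by omega)
      obtain ⟨l, hl⟩ := gstep_fold_prefix E (reachN E m) (reachN E m)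
      rw [← growStep_eq] at hl
      have hlne : l ≠ [] := by
        intro h; rw [h, List.append_nil] at hl; exact hne hl
      have : (reachN E (m + 1)).length = (reachN E m).length + l.length := by
        rw [reachN_succ, hl, List.length_append]
      have : 1 ≤ l.length := List.length_pos_iff.2 hlne
      omega
  have := grow (2 * E.length + 2) (le_refl _)
  have := reachN_length_le E (2 * E.length + 2)
  omega

lemma reachAll_fixed (E : List (Int × Int)) : growStep E (reachAll E) = reachAll E := by
  obtain ⟨k₀, hk₀, hfix⟩ := reach_fix_exists E
  have hstable : ∀ j, reachN E (k₀ + j) = reachN E k₀ := by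
    intro j
    induction j with
    | zero => rfl
    | succ m ih => rw [← Nat.add_assoc, reachN_succ, ih, hfix]
  have h1 : reachAll E = reachN E k₀ := by
    unfold reachAll
    have : 2 * E.length + 2 = k₀ + (2 * E.length + 2 - k₀) := by omega
    rw [this, hstable]
  rw [h1, hfix]

lemma reachAll_closed (E : List (Int × Int)) (e : Int × Int) (he : e ∈ E) :
    (e.1 ∈ reachAll E → e.2 ∈ reachAll E) ∧ (e.2 ∈ reachAll E → e.1 ∈ reachAll E) :=
  growStep_closed E (reachAll E) (reachAll_fixed E) e he
lemma find?_range_le (p : Nat → Bool) : ∀ (n k : Nat), k < n → p k = true →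
    ∃ j, (List.range n).find? p = some j ∧ j ≤ k ∧ p j = true := by
  intro n
  induction n with
  | zero => intro k hk; omega
  | succ m ih =>
    intro k hk hp
    rw [List.range_succ, List.find?_append]
    rcases Nat.lt_or_ge k m with hkm | hkm
    · obtain ⟨j, hj, hjk, hpj⟩ := ih k hkm hp
      exact ⟨j, by rw [hj]; rfl, hjk, hpj⟩
    · have hk' : k = m := by omega
      subst hk'
      cases hfind : (List.range k).find? p with
      | some j =>
        have hpj : p j = true := List.find?_some hfind
        have hjm : j < k := List.mem_range.1 (List.mem_of_find?_eq_some hfind)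
        exact ⟨j, rfl, by omega, hpj⟩
      | none =>
        refine ⟨k, ?_, le_refl _, hp⟩
        simp [hp]

lemma one_mem_reachAll (E : List (Int × Int)) : (1 : Int) ∈ reachAll E :=
  reachN_mono_le E (Nat.zero_le _) 1 (by simp [reachN])

lemma lvl_one (E : List (Int × Int)) : lvl E 1 = 0 := by
  unfold lvl
  obtain ⟨j, hj, hjk, _⟩ := find?_range_le (fun k => decide ((1 : Int) ∈ reachN E k))
    (2 * E.length + 3) 0 (by omega) (by simp [reachN])
  rw [hj]
  simpa using hjk

lemma lvl_le_of_mem (E : List (Int × Int)) (v : Int) (k : Nat) (hk : k ≤ 2 * E.length + 2)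
    (hv : v ∈ reachN E k) : lvl E v ≤ k := by
  unfold lvl
  obtain ⟨j, hj, hjk, _⟩ := find?_range_le (fun k => decide (v ∈ reachN E k))
    (2 * E.length + 3) k (by omega) (by simpa using hv)
  rw [hj]
  simpa using hjk

lemma lvl_le_bound (E : List (Int × Int)) (v : Int) (hv : v ∈ reachAll E) :
    lvl E v ≤ 2 * E.length + 2 :=
  lvl_le_of_mem E v _ (le_refl _) hv
lemma countP_two {α : Type} (l : List α) (p : α → Bool) (a b : α) (ha : a ∈ l) (hb : b ∈ l)
    (hne : a ≠ b) (hpa : p a = true) (hpb : p b = true) : 2 ≤ l.countP p := by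
  rw [List.countP_eq_length_filter]
  have ha' : a ∈ l.filter p := List.mem_filter.2 ⟨ha, hpa⟩
  have hb' : b ∈ l.filter p := List.mem_filter.2 ⟨hb, hpb⟩
  obtain ⟨s, t, hst⟩ := List.append_of_mem ha'
  rw [hst] at hb' ⊢
  simp only [List.length_append, List.length_cons]
  rcases List.mem_append.1 hb' with h | h
  · have : s ≠ [] := by rintro rfl; simp at h
    have := List.length_pos_iff.2 this
    omega
  · rcases List.mem_cons.1 h with rfl | h
    · exact absurd rfl hne
    · have : t ≠ [] := by rintro rfl; simp at h
      have := List.length_pos_iff.2 this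
      omega

-- dfs call invariant: curr is reachable and parent is its (unique) lower-level neighbour
def GoodCall (E : List (Int × Int)) (curr : Int) (parent : Option Int) : Prop :=
  curr ∈ reachAll E ∧
    ((parent = none ∧ lvl E curr = 0) ∨
     (∃ p, parent = some p ∧ lvl E curr = lvl E p + 1 ∧ ((curr, p) ∈ E ∨ (p, curr) ∈ E)))

theorem dfsA_total (wires : List (List Int))
    (hP4 : ∀ e ∈ wireEdges wires,
      (e.1 ∈ reachAll (wireEdges wires) ∨ e.2 ∈ reachAll (wireEdges wires)) →
      (lvl (wireEdges wires) e.2 = lvl (wireEdges wires) e.1 + 1 ∨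
       lvl (wireEdges wires) e.1 = lvl (wireEdges wires) e.2 + 1))
    (hP5 : ∀ v ∈ reachAll (wireEdges wires), v ≠ 1 → downCount (wireEdges wires) v = 1) :
    ∀ (f : Nat) (curr : Int) (parent : Option Int) (tmp : Array Int),
      GoodCall (wireEdges wires) curr parent →
      2 * (wireEdges wires).length + 3 ≤ f + lvl (wireEdges wires) curr →
      (dfsA (buildAdj wires) f curr parent tmp).isSome := by
  set E := wireEdges wires with hE
  intro f
  induction f using Nat.strong_induction_on with
  | _ f IH =>
  intro curr parent tmp hgood hfuel
  obtain ⟨hcurr, hpar⟩ := hgood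
  have hlvl_bound : lvl E curr ≤ 2 * E.length + 2 := lvl_le_bound E curr hcurr
  cases f with
  | zero => omega
  | succ g =>
  rw [dfsA]
  have hGo : ∀ (nbrs : List Int), (∀ x ∈ nbrs, x ∈ (buildAdj wires).getD curr []) →
      ∀ (cnt : Int) (tmp' : Array Int),
        (dfsAGo (buildAdj wires) g curr nbrs parent cnt tmp').isSome := by
    intro nbrs
    induction nbrs with
    | nil => intro _ cnt tmp'; simp [dfsAGo]
    | cons nxt rest ihn =>
      intro hmem cnt tmp'
      rw [dfsAGo]
      by_cases hskip : some nxt = parent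
      · rw [if_neg (by simp [hskip])]
        exact ihn (fun x hx => hmem x (List.mem_cons_of_mem _ hx)) cnt tmp'
      · rw [if_pos (by simp [hskip])]
        -- nxt is a neighbour of curr
        have hedge : (curr, nxt) ∈ E ∨ (nxt, curr) ∈ E :=
          buildAdj_mem wires curr nxt (hmem nxt List.mem_cons_self)
        have hnxt_mem : nxt ∈ reachAll E := by
          rcases hedge with h | h
          · exact (reachAll_closed E _ h).1 hcurr
          · exact (reachAll_closed E _ h).2 hcurr
        have hlvl : lvl E nxt = lvl E curr + 1 ∨ lvl E curr = lvl E nxt + 1 := by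
          rcases hedge with h | h
          · exact hP4 _ h (Or.inl hcurr)
          · rcases hP4 _ h (Or.inr hcurr) with h' | h'
            · exact Or.inr h'
            · exact Or.inl h'
        rcases hlvl with hup | hdown
        · -- recurse into the child
          have hrec := IH g (Nat.lt_succ_self g) nxt (some curr) tmp'
            ⟨hnxt_mem, Or.inr ⟨curr, rfl, hup, by tauto⟩⟩ (by omega)
          cases hd : dfsA (buildAdj wires) g nxt (some curr) tmp' with
          | none => rw [hd] at hrec; simp at hrec
          | some q =>
            rcases q with ⟨c, t⟩
            exact ihn (fun x hx => hmem x (List.mem_cons_of_mem _ hx)) (cnt + c) t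
        · -- a second downward edge: contradicts downCount = 1
          exfalso
          have hcurr_ne1 : curr ≠ 1 := by
            intro h; rw [h, lvl_one] at hdown; omega
          obtain ⟨p, hpeq, hplvl, hpedge⟩ : ∃ p, parent = some p ∧
              lvl E curr = lvl E p + 1 ∧ ((curr, p) ∈ E ∨ (p, curr) ∈ E) := by
            rcases hpar with ⟨_, h0⟩ | h
            · rw [h0] at hdown; omega
            · exact h
          have hne_pn : nxt ≠ p := fun h => hskip (by rw [h, hpeq])
          -- the two edge occurrences are distinct elements of E satisfying the down predicate
          set pd := fun e : Int × Int => decide ((e.1 = curr ∧ lvl E e.2 + 1 = lvl E curr) ∨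
            (e.2 = curr ∧ lvl E e.1 + 1 = lvl E curr)) with hpd
          have hge2 : 2 ≤ E.countP pd := by
            rcases hpedge with hp1 | hp1 <;> rcases hedge with hn1 | hn1
            · exact countP_two E pd _ _ hp1 hn1
                (by intro h; injection h with h1 h2; exact hne_pn h2.symm)
                (by simp [hpd]; omega) (by simp [hpd]; omega)
            · exact countP_two E pd _ _ hp1 hn1
                (by intro h; injection h with h1 h2; rw [h1] at hdown; omega)
                (by simp [hpd]; omega) (by simp [hpd]; omega)
            · exact countP_two E pd _ _ hp1 hn1
                (by intro h; injection h with h1 h2; rw [h1] at hplvl; omega)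
                (by simp [hpd]; omega) (by simp [hpd]; omega)
            · exact countP_two E pd _ _ hp1 hn1
                (by intro h; injection h with h1 h2; exact hne_pn h1.symm)
                (by simp [hpd]; omega) (by simp [hpd]; omega)
          have := hP5 curr hcurr hcurr_ne1
          unfold downCount at this
          rw [← hpd] at this
          omega
  have := hGo ((buildAdj wires).getD curr []) (fun x hx => hx) 1 tmp
  cases hgo : dfsAGo (buildAdj wires) g curr ((buildAdj wires).getD curr []) parent 1 tmp with
  | none => rw [hgo] at this; simp at this
  | some q => rcases q with ⟨c, t⟩; simp

theorem solution_eq_alt (n : Int) (wires : List (List Int)) (hpre : Pre_solution n wires) :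
    solution n wires = solution_alt n wires := by
  obtain ⟨hn, hw2, hP3, hP4, hP5⟩ := hpre
  have hElen : (wireEdges wires).length ≤ wires.length := List.length_filterMap_le _ _
  have htotal := dfsA_total wires hP4 hP5 (2 * wires.length + 4) 1 none
    (Array.replicate (n + 1).toNat 0)
    ⟨one_mem_reachAll _, Or.inl ⟨rfl, lvl_one _⟩⟩ (by omega)
  rw [Option.isSome_iff_exists] at htotal
  obtain ⟨⟨c, t⟩, hd⟩ := htotal
  have hN : ∀ v, ((buildAdj wires).getD v []).length ≤ 2 * wires.length := buildAdj_len wires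
  have hle : (2 * wires.length + 2) ^ (2 * wires.length + 4)
      ≤ (2 * wires.length + 4) ^ (2 * wires.length + 5) := by
    calc (2 * wires.length + 2) ^ (2 * wires.length + 4)
        ≤ (2 * wires.length + 4) ^ (2 * wires.length + 4) :=
          Nat.pow_le_pow_left (by omega) _
      _ ≤ (2 * wires.length + 4) ^ (2 * wires.length + 5) :=
          Nat.pow_le_pow_right (by omega) (by omega)
  have hrun := runB_of_dfsA (buildAdj wires) (2 * wires.length) hN (2 * wires.length + 4)
    (Array.replicate (n + 1).toNat 0) c t hd
    ((2 * wires.length + 4) ^ (2 * wires.length + 5)) hle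
  unfold solution solution_alt
  simp only [hd, hrun]
  exact final_loops_eq n t

-- ===== VERDICT (by name: the statement is the Claim_ definition above) =====
theorem solution_spec : Claim_equal_solution := by
  intro n wires _ hpre
  show solution n wires = solution_alt n wires
  exact solution_eq_alt n wires hpre
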